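-- pv_equiv track=rewrite | github.com/codewithEshaYoutube/UC_Berkley_CALICO_Spring-25 | SOLUTION4.py | min_actions_to_visit_buttons
-- ===== SOURCE A (Python) =====
-- def min_actions_to_visit_buttons(T, test_cases):
--     results = []
--
--     for case in test_cases:
--         N, M, grid = case
--         pos = {}
--         for r in range(N):
--             for c in range(M):
--                 pos[grid[r][c]] = (r, c)
--
--         actions = 0
--         current_r, current_c = 0, 0
--
--         for num in range(1, N * M + 1):
--             target_r, target_c = pos[num]
--             vert_move = min(abs(current_r - target_r), N - abs(current_r - target_r))
--             hori_move = min(abs(current_c - target_c), M - abs(current_c - target_c))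
--             actions += vert_move + hori_move
--             current_r, current_c = target_r, target_c
--
--         results.append(actions)
--
--     return results
-- ===== SOURCE B (Python) =====
-- def _case_cost(N, M, grid):
--     cells = sorted(((grid[r][c], r, c) for r in range(N) for c in range(M)),
--                    key=lambda t: t[0])
--     route = [(0, 0)] + [(r, c) for _, r, c in cells]
--     return sum(min(abs(r1 - r2), N - abs(r1 - r2)) + min(abs(c1 - c2), M - abs(c1 - c2))
--                for (r1, c1), (r2, c2) in zip(route, route[1:]))
--
-- def min_actions_to_visit_buttons(T, test_cases):
--     return [_case_cost(N, M, grid) for N, M, grid in test_cases]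
-- ===== Notes on version B (the rewrite author's own statement) =====
-- stated objective: alternative
-- what changed: Replaces A's value->position dict plus a current-position tracking loop over 1..N*M by a sort-first pairwise pass: collect (value,r,c) cells, sort by value, prepend the start, and sum toroidal distances over zip(route, route[1:]).
import Mathlib
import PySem

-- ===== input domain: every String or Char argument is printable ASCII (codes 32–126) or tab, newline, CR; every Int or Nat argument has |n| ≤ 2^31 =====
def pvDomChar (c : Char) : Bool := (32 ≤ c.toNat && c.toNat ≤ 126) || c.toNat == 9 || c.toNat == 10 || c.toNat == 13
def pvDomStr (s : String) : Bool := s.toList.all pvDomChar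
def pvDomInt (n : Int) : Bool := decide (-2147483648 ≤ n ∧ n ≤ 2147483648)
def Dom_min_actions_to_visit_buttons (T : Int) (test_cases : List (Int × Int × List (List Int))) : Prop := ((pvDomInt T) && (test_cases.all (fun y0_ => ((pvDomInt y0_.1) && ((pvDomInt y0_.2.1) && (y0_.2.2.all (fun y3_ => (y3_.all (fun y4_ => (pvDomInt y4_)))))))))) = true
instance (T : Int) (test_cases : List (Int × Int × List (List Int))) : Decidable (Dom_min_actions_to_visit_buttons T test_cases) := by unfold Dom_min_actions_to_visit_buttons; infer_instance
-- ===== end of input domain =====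

-- B replaces A's value->position dict and current-position tracking loop by a sort-by-value
-- pass and a pairwise fold over consecutive route positions (objective: alternative).

-- ===== PORT A =====
-- per-case body of A's loop: build pos = {grid[r][c]: (r,c)}, then walk num = 1..N*M.
-- grid[r]/row[c] use pyGetD and pos[num] uses Dict.getD: Pre_ guarantees the index is in
-- range and the key present exactly where Python would otherwise raise.
def pvACase (N M : Int) (grid : List (List Int)) : Int :=
  let pos : PySem.Dict Int (Int × Int) :=
    (PySem.List.pyRange 0 N 1).foldl (fun pos r =>
      (PySem.List.pyRange 0 M 1).foldl (fun pos c =>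
        pos.insert (PySem.List.pyGetD (PySem.List.pyGetD grid r []) c 0) (r, c)) pos)
      PySem.Dict.empty
  ((PySem.List.pyRange 1 (N * M + 1) 1).foldl (fun (st : Int × Int × Int) num =>
      let t := pos.getD num (0, 0)
      let vert := min |st.2.1 - t.1| (N - |st.2.1 - t.1|)
      let hori := min |st.2.2 - t.2| (M - |st.2.2 - t.2|)
      (st.1 + vert + hori, t.1, t.2))
    (0, 0, 0)).1

def min_actions_to_visit_buttons (T : Int) (test_cases : List (Int × Int × List (List Int))) : List Int :=
  test_cases.foldl (fun results case => results ++ [pvACase case.1 case.2.1 case.2.2]) []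

-- ===== PORT B =====
-- cells = sorted(((grid[r][c], r, c) ...), key=lambda t: t[0])
def pvBCells (N M : Int) (grid : List (List Int)) : List (Int × Int × Int) :=
  PySem.List.sorted
    ((PySem.List.pyRange 0 N 1).flatMap (fun r =>
      (PySem.List.pyRange 0 M 1).map (fun c =>
        (PySem.List.pyGetD (PySem.List.pyGetD grid r []) c 0, r, c))))
    (fun t => t.1) false

-- route = [(0,0)] + positions; sum over zip(route, route[1:])  (route[1:] = drop 1, exact here)
def pvBCaseCost (N M : Int) (grid : List (List Int)) : Int :=
  let route : List (Int × Int) := (0, 0) :: (pvBCells N M grid).map (fun t => (t.2.1, t.2.2))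
  (route.zip (route.drop 1)).foldl
    (fun acc pq =>
      acc + (min |pq.1.1 - pq.2.1| (N - |pq.1.1 - pq.2.1|) +
             min |pq.1.2 - pq.2.2| (M - |pq.1.2 - pq.2.2|)))
    0

def min_actions_to_visit_buttons_alt (T : Int) (test_cases : List (Int × Int × List (List Int))) : List Int :=
  test_cases.map (fun case => pvBCaseCost case.1 case.2.1 case.2.2)

-- ===== PRECONDITION & SPEC =====
-- Pre_ admits exactly the cases where A returns: grid has at least N rows, each of the first
-- N rows has at least M entries (otherwise grid[r][c] raises IndexError), and the N×M block
-- of values read by A is a permutation of 1..N*M — stated as length + distinctness + bounds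
-- (otherwise pos[num] raises KeyError); for M ≤ 0 the grid is never indexed, so the shape
-- conditions are only required when 0 < M.
def Pre_min_actions_to_visit_buttons (T : Int) (test_cases : List (Int × Int × List (List Int))) : Prop :=
  ∀ case ∈ test_cases,
    (0 < case.2.1 →
      case.1.toNat ≤ case.2.2.length ∧
      (∀ row ∈ case.2.2.take case.1.toNat, case.2.1.toNat ≤ row.length)) ∧
    ((case.2.2.take case.1.toNat).flatMap (fun row => row.take case.2.1.toNat)).length
      = (case.1 * case.2.1).toNat ∧
    ((case.2.2.take case.1.toNat).flatMap (fun row => row.take case.2.1.toNat)).Nodup ∧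
    (∀ v ∈ (case.2.2.take case.1.toNat).flatMap (fun row => row.take case.2.1.toNat),
      1 ≤ v ∧ v ≤ case.1 * case.2.1)
instance (T : Int) (test_cases : List (Int × Int × List (List Int))) : Decidable (Pre_min_actions_to_visit_buttons T test_cases) := by unfold Pre_min_actions_to_visit_buttons; infer_instance

def pvWitness_min_actions_to_visit_buttons : Int × (List (Int × Int × List (List Int))) :=
  (1, [(2, 2, [[1, 3], [4, 2]])])

def Spec_min_actions_to_visit_buttons (T : Int) (test_cases : List (Int × Int × List (List Int))) (out : List Int) : Prop := out = min_actions_to_visit_buttons_alt T test_cases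
instance (T : Int) (test_cases : List (Int × Int × List (List Int))) (out : List Int) : Decidable (Spec_min_actions_to_visit_buttons T test_cases out) := by unfold Spec_min_actions_to_visit_buttons; infer_instance

-- ===== CLAIM (what is proved, stated in full; the proofs are below) =====
def Claim_equal_min_actions_to_visit_buttons : Prop := ∀ (T : Int) (test_cases : List (Int × Int × List (List Int))), Dom_min_actions_to_visit_buttons T test_cases → Pre_min_actions_to_visit_buttons T test_cases → Spec_min_actions_to_visit_buttons T test_cases (min_actions_to_visit_buttons T test_cases)

-- ===== LEMMAS AND PROOFS =====

theorem pvMapTake {α : Type} (xs : List α) (M : Int) (d : α) (h : M.toNat ≤ xs.length) :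
    (PySem.List.pyRange 0 M 1).map (fun c => PySem.List.pyGetD xs c d) = xs.take M.toNat := by
  rw [PySem.List.pyRange_one, List.map_map]
  apply List.ext_getElem
  · simp [h]
  · intro k h1 h2
    simp only [List.length_map, List.length_range] at h1
    simp only [List.getElem_map, List.getElem_range, Function.comp_apply, List.getElem_take]
    rw [PySem.List.pyGetD_eq_getElem]
    · congr 1; omega
    · omega
    · simp; omega

def pvCells (N M : Int) (grid : List (List Int)) : List (Int × Int × Int) :=
  (PySem.List.pyRange 0 N 1).flatMap (fun r =>
    (PySem.List.pyRange 0 M 1).map (fun c =>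
      (PySem.List.pyGetD (PySem.List.pyGetD grid r []) c 0, r, c)))

theorem pvMapFstCells (N M : Int) (grid : List (List Int))
    (h12 : 0 < M → N.toNat ≤ grid.length ∧
      ∀ row ∈ grid.take N.toNat, M.toNat ≤ row.length) :
    (pvCells N M grid).map (fun t => t.1) =
      (grid.take N.toNat).flatMap (fun row => row.take M.toNat) := by
  by_cases hM : 0 < M
  case neg =>
    have hM0 : M.toNat = 0 := by omega
    unfold pvCells
    rw [PySem.List.pyRange_one_eq_nil (by omega : M ≤ 0)]
    rw [List.flatMap_eq_nil_iff.mpr (by intro x hx; rfl),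
        List.flatMap_eq_nil_iff.mpr (by intro x hx; simp [hM0])]
    rfl
  obtain ⟨h1, h2⟩ := h12 hM
  unfold pvCells
  rw [List.map_flatMap]
  have hrow : ∀ r ∈ PySem.List.pyRange 0 N 1,
      ((PySem.List.pyRange 0 M 1).map (fun c =>
        (PySem.List.pyGetD (PySem.List.pyGetD grid r []) c 0, r, c))).map (fun t => t.1)
      = (PySem.List.pyGetD grid r []).take M.toNat := by
    intro r hr
    rw [List.map_map]
    have hb := (PySem.List.mem_pyRange_one).1 hr
    have hmem : PySem.List.pyGetD grid r [] ∈ grid.take N.toNat := by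
      rw [PySem.List.pyGetD_eq_getElem _ _ hb.1 (by omega)]
      have hk : r.toNat < (grid.take N.toNat).length := by simp; omega
      have := List.getElem_mem hk
      rwa [List.getElem_take] at this
    exact pvMapTake _ M 0 (h2 _ hmem)
  calc (PySem.List.pyRange 0 N 1).flatMap (fun r =>
        ((PySem.List.pyRange 0 M 1).map (fun c =>
          (PySem.List.pyGetD (PySem.List.pyGetD grid r []) c 0, r, c))).map (fun t => t.1))
      = (PySem.List.pyRange 0 N 1).flatMap (fun r => (PySem.List.pyGetD grid r []).take M.toNat) := by
        exact List.flatMap_congr hrow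
    _ = (grid.take N.toNat).flatMap (fun row => row.take M.toNat) := by
        rw [← pvMapTake grid N [] h1, List.flatMap_map]

theorem pvFoldlFlatMap {α β γ : Type} (l : List α) (g : α → List β) (f : γ → β → γ) (i : γ) :
    (l.flatMap g).foldl f i = l.foldl (fun a x => (g x).foldl f a) i := by
  induction l generalizing i with
  | nil => rfl
  | cons x t ih => simp [List.flatMap_cons, List.foldl_append, ih]

theorem pvGetFoldlNotMem {ν : Type} (l : List (Int × ν)) (d : PySem.Dict Int ν) (k : Int)
    (h : k ∉ l.map (fun t => t.1)) :
    (l.foldl (fun d t => d.insert t.1 t.2) d).get? k = d.get? k := by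
  induction l generalizing d with
  | nil => rfl
  | cons x t ih =>
    simp only [List.map_cons, List.mem_cons, not_or] at h
    rw [List.foldl_cons, ih _ h.2, PySem.Dict.get?_insert_of_ne _ _ h.1]

theorem pvGetFoldlMem {ν : Type} (l : List (Int × ν)) (t : Int × ν)
    (hn : (l.map (fun t => t.1)).Nodup) (ht : t ∈ l) :
    (l.foldl (fun d t => d.insert t.1 t.2) PySem.Dict.empty).get? t.1 = some t.2 := by
  suffices h : ∀ d : PySem.Dict Int ν, (l.foldl (fun d t => d.insert t.1 t.2) d).get? t.1 = some t.2 from h _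
  induction l with
  | nil => cases ht
  | cons x r ih =>
    intro d
    simp only [List.map_cons, List.nodup_cons] at hn
    rcases List.mem_cons.1 ht with h | h
    · subst h
      rw [List.foldl_cons, pvGetFoldlNotMem _ _ _ hn.1, PySem.Dict.get?_insert_self]
    · rw [List.foldl_cons]; exact ih hn.2 h _

theorem pvFoldlRangeGetD {α β : Type} [Inhabited α] (l : List α) (f : β → α → β) (i : β) (d : α) :
    (List.range l.length).foldl (fun st k => f st (l.getD k d)) i = l.foldl f i := by
  have hmap : (List.range l.length).map (fun k => l.getD k d) = l := by
    apply List.ext_getElem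
    · simp
    · intro k h1 h2
      simp [List.getD_eq_getElem?_getD, List.getElem?_eq_getElem h2]
  calc (List.range l.length).foldl (fun st k => f st (l.getD k d)) i
      = ((List.range l.length).map (fun k => l.getD k d)).foldl f i := by rw [List.foldl_map]
    _ = l.foldl f i := by rw [hmap]





theorem pvBCells_eq (N M : Int) (grid : List (List Int)) :
    pvBCells N M grid = PySem.List.sorted (pvCells N M grid) (fun t => t.1) false := rfl

theorem pvZipFold (g : (Int × Int) → (Int × Int) → Int) (l : List (Int × Int))
    (c : Int × Int) (acc : Int) :
    ((c :: l).zip l).foldl (fun a pq => a + g pq.1 pq.2) acc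
      = (l.foldl (fun (st : Int × Int × Int) q => (st.1 + g st.2 q, q)) (acc, c)).1 := by
  induction l generalizing c acc with
  | nil => rfl
  | cons q t ih => simpa using ih q (acc + g c q)

def pvDictA (N M : Int) (grid : List (List Int)) : PySem.Dict Int (Int × Int) :=
  (PySem.List.pyRange 0 N 1).foldl (fun pos r =>
      (PySem.List.pyRange 0 M 1).foldl (fun pos c =>
        pos.insert (PySem.List.pyGetD (PySem.List.pyGetD grid r []) c 0) (r, c)) pos)
    PySem.Dict.empty

theorem pvPosEq (N M : Int) (grid : List (List Int)) :
    pvDictA N M grid = (pvCells N M grid).foldl (fun d t => d.insert t.1 t.2) PySem.Dict.empty := by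
  unfold pvDictA pvCells
  rw [pvFoldlFlatMap]
  congr 1
  funext pos r
  rw [List.foldl_map]

-- length + distinctness + bounds force the block to be a permutation of 1..N*M
theorem pvPermOfConds (l : List Int) (nm : Nat)
    (hlen : l.length = nm) (hnd : l.Nodup) (hb : ∀ v ∈ l, 1 ≤ v ∧ v ≤ (nm : Int)) :
    l.Perm ((List.range nm).map (fun k : Nat => (k : Int) + 1)) := by
  have hRnodup : ((List.range nm).map (fun k : Nat => (k : Int) + 1)).Nodup :=
    List.Nodup.map (f := fun k : Nat => (k : Int) + 1)
      (fun a b hab => by simp only at hab; omega) List.nodup_range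
  have hmemR : ∀ x : Int, x ∈ (List.range nm).map (fun k : Nat => (k : Int) + 1) ↔
      1 ≤ x ∧ x ≤ (nm : Int) := by
    intro x
    simp only [List.mem_map, List.mem_range]
    constructor
    · rintro ⟨k, hk, rfl⟩; omega
    · intro hx; exact ⟨(x - 1).toNat, by omega, by omega⟩
  apply List.perm_of_nodup_nodup_toFinset_eq hnd hRnodup
  apply Finset.eq_of_subset_of_card_le
  · intro v hv
    rw [List.mem_toFinset] at hv ⊢
    exact (hmemR v).2 (hb v hv)
  · rw [List.toFinset_card_of_nodup hnd, List.toFinset_card_of_nodup hRnodup]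
    simp [hlen]

theorem pvCaseEq (N M : Int) (grid : List (List Int))
    (h12 : 0 < M → N.toNat ≤ grid.length ∧
      ∀ row ∈ grid.take N.toNat, M.toNat ≤ row.length)
    (hlen : ((grid.take N.toNat).flatMap (fun row => row.take M.toNat)).length = (N * M).toNat)
    (hnd : ((grid.take N.toNat).flatMap (fun row => row.take M.toNat)).Nodup)
    (hb : ∀ v ∈ (grid.take N.toNat).flatMap (fun row => row.take M.toNat), 1 ≤ v ∧ v ≤ N * M) :
    pvACase N M grid = pvBCaseCost N M grid := by
  have hperm : ((grid.take N.toNat).flatMap (fun row => row.take M.toNat)).Perm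
      ((List.range (N * M).toNat).map (fun k : Nat => (k : Int) + 1)) :=
    pvPermOfConds _ _ hlen hnd (by intro v hv; have := hb v hv; constructor <;> [omega; (push_cast; omega)])
  have hpermR : ((pvCells N M grid).map (fun t => t.1)).Perm
      ((List.range (N * M).toNat).map (fun k : Nat => (k : Int) + 1)) := by
    rw [pvMapFstCells N M grid h12]; exact hperm
  have hRnodup : ((List.range (N * M).toNat).map (fun k : Nat => (k : Int) + 1)).Nodup :=
    List.Nodup.map (f := fun k : Nat => (k : Int) + 1)
      (fun a b hab => by simp only at hab; omega) List.nodup_range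
  have hnodup : ((pvCells N M grid).map (fun t => t.1)).Nodup :=
    (List.Perm.nodup_iff hpermR).2 hRnodup
  have hsperm : (pvBCells N M grid).Perm (pvCells N M grid) := by
    rw [pvBCells_eq]; exact PySem.List.sorted_perm _ _ _
  have hsfst : (pvBCells N M grid).map (fun t => t.1)
      = (List.range (N * M).toNat).map (fun k : Nat => (k : Int) + 1) := by
    apply List.Perm.eq_of_pairwise (fun a b _ _ hab hba => le_antisymm hab hba)
    · rw [pvBCells_eq]; exact PySem.List.sorted_map_key_pairwise _ _
    · exact List.Pairwise.map (fun k : Nat => (k : Int) + 1)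
        (fun a b hab => by simp only; omega) List.pairwise_lt_range
    · exact (hsperm.map _).trans hpermR
  have hslen : (pvBCells N M grid).length = (N * M).toNat := by
    have := congrArg List.length hsfst; simpa using this
  have hlen2 : ((pvBCells N M grid).map (fun t => (t.2.1, t.2.2))).length = (N * M).toNat := by
    simpa using hslen
  have hget : ∀ (k : Nat), k < (N * M).toNat →
      ((pvCells N M grid).foldl (fun d t => d.insert t.1 t.2) PySem.Dict.empty).getD
        (1 + (k : Int)) ((0 : Int), (0 : Int))
      = ((pvBCells N M grid).map (fun t => (t.2.1, t.2.2))).getD k (0, 0) := by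
    intro k hk
    have hk' : k < (pvBCells N M grid).length := by omega
    have hkey : ((pvBCells N M grid)[k]'hk').1 = (k : Int) + 1 := by
      have h := List.getElem_of_eq hsfst (by simpa [hslen] using hk)
      simpa using h
    have hmem : (pvBCells N M grid)[k]'hk' ∈ pvCells N M grid :=
      hsperm.subset (List.getElem_mem hk')
    have hg := pvGetFoldlMem (pvCells N M grid) ((pvBCells N M grid)[k]'hk') hnodup hmem
    rw [PySem.Dict.getD_eq_get?_getD]
    rw [show (1 : Int) + (k : Int) = (k : Int) + 1 by ring, ← hkey, hg]
    simp [List.getD_eq_getElem?_getD, hk']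
  -- A as a fold over the sorted positions
  have hAeq : pvACase N M grid
      = ((PySem.List.pyRange 1 (N * M + 1) 1).foldl (fun (st : Int × Int × Int) num =>
          (st.1 + min |st.2.1 - ((pvDictA N M grid).getD num (0, 0)).1|
                    (N - |st.2.1 - ((pvDictA N M grid).getD num (0, 0)).1|)
                + min |st.2.2 - ((pvDictA N M grid).getD num (0, 0)).2|
                    (M - |st.2.2 - ((pvDictA N M grid).getD num (0, 0)).2|),
           (pvDictA N M grid).getD num (0, 0))) (0, 0, 0)).1 := rfl
  have hRange : PySem.List.pyRange 1 (N * M + 1) 1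
      = (List.range (N * M).toNat).map (fun k : Nat => 1 + (k : Int)) := by
    rw [PySem.List.pyRange_one, show N * M + 1 - 1 = N * M from by ring]
  rw [hAeq, pvPosEq, hRange, List.foldl_map]
  rw [PySem.List.foldl_congr_mem _ _
    (fun (st : Int × Int × Int) (k : Nat) =>
      (st.1 + min |st.2.1 - (((pvBCells N M grid).map (fun t => (t.2.1, t.2.2))).getD k (0, 0)).1|
                (N - |st.2.1 - (((pvBCells N M grid).map (fun t => (t.2.1, t.2.2))).getD k (0, 0)).1|)
            + min |st.2.2 - (((pvBCells N M grid).map (fun t => (t.2.1, t.2.2))).getD k (0, 0)).2|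
                (M - |st.2.2 - (((pvBCells N M grid).map (fun t => (t.2.1, t.2.2))).getD k (0, 0)).2|),
       ((pvBCells N M grid).map (fun t => (t.2.1, t.2.2))).getD k (0, 0))) _
    (fun acc k hkmem => by
      have hk := List.mem_range.1 hkmem
      rw [hget k hk])]
  rw [← hlen2]
  rw [pvFoldlRangeGetD ((pvBCells N M grid).map (fun t => (t.2.1, t.2.2)))
    (fun (st : Int × Int × Int) (q : Int × Int) =>
      (st.1 + min |st.2.1 - q.1| (N - |st.2.1 - q.1|)
            + min |st.2.2 - q.2| (M - |st.2.2 - q.2|), q)) (0, 0, 0) (0, 0)]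
  -- B as the tracker fold
  have hBeq : pvBCaseCost N M grid
      = ((((0, 0) :: (pvBCells N M grid).map (fun t => (t.2.1, t.2.2))).zip
            ((pvBCells N M grid).map (fun t => (t.2.1, t.2.2)))).foldl
          (fun acc pq =>
            acc + (min |pq.1.1 - pq.2.1| (N - |pq.1.1 - pq.2.1|) +
                   min |pq.1.2 - pq.2.2| (M - |pq.1.2 - pq.2.2|))) 0) := rfl
  rw [hBeq, pvZipFold (fun p q => min |p.1 - q.1| (N - |p.1 - q.1|) + min |p.2 - q.2| (M - |p.2 - q.2|))]
  congr 1
  apply PySem.List.foldl_congr_mem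
  intro acc q _
  simp only [Prod.mk.injEq]
  exact ⟨by ring, trivial⟩

-- ===== VERDICT (by name: the statement is the Claim_ definition above) =====
theorem min_actions_to_visit_buttons_spec : Claim_equal_min_actions_to_visit_buttons := by
  intro T tcs _ hpre
  unfold Spec_min_actions_to_visit_buttons min_actions_to_visit_buttons min_actions_to_visit_buttons_alt
  rw [PySem.List.foldl_append_singleton_eq_map]
  exact List.map_congr_left fun c hc =>
    pvCaseEq c.1 c.2.1 c.2.2 (hpre c hc).1 (hpre c hc).2.1
      (hpre c hc).2.2.1 (hpre c hc).2.2.2
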